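-- pv_equiv track=rewrite | github.com/humancipher/Programming_Contest | Programming_Contest/AtCoder/ABC/ABC_100-199/ABC_170-179/ABC_176/ABC_176_E.py | solve
-- ===== SOURCE A (Python) =====
-- def solve(B,H,W):
--     tate = [0 for _ in range(H)]
--     yoko = [0 for _ in range(W)]
--
--     for b in B:
--         tate[b[0]-1] += 1
--         yoko[b[1]-1] += 1
--
--     tate_max_kouho,yoko_max_kouho = set(),set()
--     tate_max,yoko_max = 0,0
--     for i in range(H):
--         if tate_max == tate[i]:
--             tate_max_kouho.add(i)
--         elif tate_max < tate[i]:
--             tate_max = tate[i]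
--             tate_max_kouho.clear()
--             tate_max_kouho.add(i)
--
--     for j in range(W):
--         if yoko_max == yoko[j]:
--             yoko_max_kouho.add(j)
--         elif yoko_max < yoko[j]:
--             yoko_max = yoko[j]
--             yoko_max_kouho.clear()
--             yoko_max_kouho.add(j)
--
--     C = set() #置かれている爆破物のうち爆破地点候補にはいっている爆破物
--     for b in B:
--         if (b[0]-1) in tate_max_kouho and (b[1]-1) in yoko_max_kouho:
--             C.add(b)
--
--     if len(tate_max_kouho) * len(yoko_max_kouho) > len(C):
--         return tate_max + yoko_max
--     else:
--         return tate_max + yoko_max - 1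
-- ===== SOURCE B (Python) =====
-- def solve(B, H, W):
--     tate = [0] * H
--     yoko = [0] * W
--     occupied = set()
--     for b in B:
--         tate[b[0] - 1] += 1
--         yoko[b[1] - 1] += 1
--         occupied.add((b[0] - 1, b[1] - 1))
--     tate_max = max(tate, default=0)
--     yoko_max = max(yoko, default=0)
--     R = [i for i in range(H) if tate[i] == tate_max]
--     C = [j for j in range(W) if yoko[j] == yoko_max]
--     for i in R:
--         for j in C:
--             if (i, j) not in occupied:
--                 return tate_max + yoko_max
--     return tate_max + yoko_max - 1
-- ===== Notes on version B (the rewrite author's own statement) =====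
-- stated objective: alternative
-- what changed: B builds the row/column counts and the occupied-cell set in one pass, uses builtin max and comprehension filters instead of A's hand-rolled running-max/argmax-set loops, and replaces A's |R|*|C| > |occupied candidate cells| cardinality comparison by a direct early-exit double-loop search for a bomb-free intersection cell.
import Mathlib
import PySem

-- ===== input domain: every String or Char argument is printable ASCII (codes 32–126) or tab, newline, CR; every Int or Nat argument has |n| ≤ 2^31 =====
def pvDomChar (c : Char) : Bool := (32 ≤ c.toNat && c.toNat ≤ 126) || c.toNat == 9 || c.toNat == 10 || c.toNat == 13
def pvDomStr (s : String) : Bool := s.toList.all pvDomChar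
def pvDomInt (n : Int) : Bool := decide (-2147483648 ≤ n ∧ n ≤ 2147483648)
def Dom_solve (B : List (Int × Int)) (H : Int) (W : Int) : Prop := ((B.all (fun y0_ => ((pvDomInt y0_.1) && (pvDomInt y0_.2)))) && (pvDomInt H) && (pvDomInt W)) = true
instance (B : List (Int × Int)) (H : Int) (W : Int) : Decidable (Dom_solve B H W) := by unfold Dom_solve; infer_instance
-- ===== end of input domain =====

-- B keeps list-based counting but merges it with an occupied-cell set in ONE pass, replaces A's
-- hand-rolled running-max/argmax-set loops by builtin max + comprehensions, and replaces A's
-- |R|*|C| > |occupied ∩ R×C| cardinality test by a direct early-exit search for a bomb-free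
-- intersection cell; equal cost (objective: alternative).

-- ===== PORT A =====
def solve (B : List (Int × Int)) (H : Int) (W : Int) : Int :=
  -- tate = [0 for _ in range(H)]; yoko = [0 for _ in range(W)]
  let tate0 := (PySem.List.pyRange 0 H 1).map (fun _ => (0 : Int))
  let yoko0 := (PySem.List.pyRange 0 W 1).map (fun _ => (0 : Int))
  -- for b in B: tate[b[0]-1] += 1; yoko[b[1]-1] += 1
  let ty := B.foldl (fun (s : List Int × List Int) b =>
      (PySem.List.pySetD s.1 (b.1 - 1) (PySem.List.pyGetD s.1 (b.1 - 1) 0 + 1),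
       PySem.List.pySetD s.2 (b.2 - 1) (PySem.List.pyGetD s.2 (b.2 - 1) 0 + 1))) (tate0, yoko0)
  -- running max + argmax-candidate set over range(H) and range(W)
  let st := (PySem.List.pyRange 0 H 1).foldl (fun (s : PySem.Set Int × Int) i =>
      if s.2 == PySem.List.pyGetD ty.1 i 0 then (PySem.Set.add s.1 i, s.2)
      else if s.2 < PySem.List.pyGetD ty.1 i 0 then
        (PySem.Set.add PySem.Set.empty i, PySem.List.pyGetD ty.1 i 0)
      else s) (PySem.Set.empty, 0)
  let sy := (PySem.List.pyRange 0 W 1).foldl (fun (s : PySem.Set Int × Int) j =>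
      if s.2 == PySem.List.pyGetD ty.2 j 0 then (PySem.Set.add s.1 j, s.2)
      else if s.2 < PySem.List.pyGetD ty.2 j 0 then
        (PySem.Set.add PySem.Set.empty j, PySem.List.pyGetD ty.2 j 0)
      else s) (PySem.Set.empty, 0)
  -- C = bombs sitting on candidate intersections
  let C := B.foldl (fun (c : PySem.Set (Int × Int)) b =>
      if PySem.Set.contains st.1 (b.1 - 1) && PySem.Set.contains sy.1 (b.2 - 1)
      then PySem.Set.add c b else c) PySem.Set.empty
  if st.1.length * sy.1.length > C.length then st.2 + sy.2 else st.2 + sy.2 - 1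

-- ===== PORT B =====
def solve_alt (B : List (Int × Int)) (H : Int) (W : Int) : Int :=
  -- tate = [0]*H; yoko = [0]*W
  let tate0 := PySem.List.pyRepeat [(0 : Int)] H
  let yoko0 := PySem.List.pyRepeat [(0 : Int)] W
  -- one pass: both counts and the occupied-cell set
  let st := B.foldl (fun (s : List Int × List Int × PySem.Set (Int × Int)) b =>
      (PySem.List.pySetD s.1 (b.1 - 1) (PySem.List.pyGetD s.1 (b.1 - 1) 0 + 1),
       PySem.List.pySetD s.2.1 (b.2 - 1) (PySem.List.pyGetD s.2.1 (b.2 - 1) 0 + 1),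
       PySem.Set.add s.2.2 (b.1 - 1, b.2 - 1))) (tate0, yoko0, PySem.Set.empty)
  -- tate_max = max(tate, default=0); yoko_max = max(yoko, default=0)
  let tateMax := PySem.List.maxD st.1 (fun x => x) 0
  let yokoMax := PySem.List.maxD st.2.1 (fun x => x) 0
  let R := (PySem.List.pyRange 0 H 1).filter (fun i => PySem.List.pyGetD st.1 i 0 == tateMax)
  let C := (PySem.List.pyRange 0 W 1).filter (fun j => PySem.List.pyGetD st.2.1 j 0 == yokoMax)
  -- search for a bomb-free intersection cell
  if R.any (fun i => C.any (fun j => !(PySem.Set.contains st.2.2 (i, j)))) then tateMax + yokoMax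
  else tateMax + yokoMax - 1

-- ===== PRECONDITION & SPEC =====
-- Pre_ is exactly A's non-raising domain: every bomb coordinate is an in-range Python list
-- index for its count array (1-H ≤ row ≤ H, 1-W ≤ col ≤ W); outside it A (and B) raise IndexError.
def Pre_solve (B : List (Int × Int)) (H : Int) (W : Int) : Prop :=
  ∀ b ∈ B, 1 - H ≤ b.1 ∧ b.1 ≤ H ∧ 1 - W ≤ b.2 ∧ b.2 ≤ W
instance (B : List (Int × Int)) (H : Int) (W : Int) : Decidable (Pre_solve B H W) := by
  unfold Pre_solve; infer_instance
def pvWitness_solve : (List (Int × Int)) × Int × Int := ([(1, 1), (1, 2)], 2, 2)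
def Spec_solve (B : List (Int × Int)) (H : Int) (W : Int) (out : Int) : Prop := out = solve_alt B H W
instance (B : List (Int × Int)) (H : Int) (W : Int) (out : Int) : Decidable (Spec_solve B H W out) := by unfold Spec_solve; infer_instance

-- ===== CLAIM (what is proved, stated in full; the proofs are below) =====
def Claim_equal_solve : Prop := ∀ (B : List (Int × Int)) (H : Int) (W : Int), Dom_solve B H W → Pre_solve B H W → Spec_solve B H W (solve B H W)

-- ===== LEMMAS AND PROOFS =====

-- the 0-based array cell that Python coordinate x hits in a length-n array (negative indices wrap)
def pvNorm (n : Nat) (x : Int) : Nat := if x - 1 < 0 then (x - 1 + n).toNat else (x - 1).toNat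
-- how many coordinates of xs hit cell i
def pvCnt (xs : List Int) (n : Nat) (i : Int) : Int :=
  (xs.countP (fun x => ((pvNorm n x : Nat) : Int) == i) : Int)
-- the maximal count over cells 0..H-1, and the list of cells attaining it
def pvM (xs : List Int) (H : Int) : Int :=
  (PySem.List.pyRange 0 H 1).foldl (fun acc i => max acc (pvCnt xs H.toNat i)) 0
def pvK (xs : List Int) (H : Int) : List Int :=
  (PySem.List.pyRange 0 H 1).filter (fun i => pvCnt xs H.toNat i == pvM xs H)

lemma pv_cnt_nonneg (xs : List Int) (n : Nat) (i : Int) : 0 ≤ pvCnt xs n i := by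
  simp [pvCnt]

lemma pv_add_notmem {α : Type} [BEq α] [LawfulBEq α] (s : PySem.Set α) (x : α) (h : x ∉ s) :
    PySem.Set.add s x = s ++ [x] := by
  simp [PySem.Set.add, h]

-- bounds and index facts for pvNorm
lemma pv_norm_lt (n : Nat) (x : Int) (h1 : 1 - (n : Int) ≤ x) (h2 : x ≤ n) :
    pvNorm n x < n := by
  unfold pvNorm; split_ifs <;> omega

lemma pv_pyIdx_natCast (n m : Nat) (h : m < n) :
    PySem.List.pyIdx? n ((m : Nat) : Int) = some m := by
  unfold PySem.List.pyIdx?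
  rw [if_pos (by omega), if_pos (by exact_mod_cast h)]
  simp

-- an in-range (possibly negative) Python index normalizes to a Nat index
lemma pv_pyIdx_norm (n : Nat) (x : Int) (h1 : 1 - (n : Int) ≤ x) (h2 : x ≤ n) :
    PySem.List.pyIdx? n (x - 1) = some (pvNorm n x) := by
  unfold PySem.List.pyIdx? pvNorm
  by_cases hneg : x - 1 < 0
  · rw [if_neg (by omega : ¬ (0:Int) ≤ x - 1), if_pos (by omega : -(n:Int) ≤ x - 1), if_pos hneg]
    congr 1
    omega
  · rw [if_pos (by omega : (0:Int) ≤ x - 1), if_pos (by omega : x - 1 < (n:Int)), if_neg hneg]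

lemma pv_pySetD_norm {α : Type} (t : List α) (x : Int) (v : α)
    (h1 : 1 - (t.length : Int) ≤ x) (h2 : x ≤ t.length) :
    PySem.List.pySetD t (x - 1) v = PySem.List.pySetD t ((pvNorm t.length x : Nat) : Int) v := by
  unfold PySem.List.pySetD PySem.List.pySet?
  rw [pv_pyIdx_norm t.length x h1 h2, pv_pyIdx_natCast t.length _ (pv_norm_lt t.length x h1 h2)]

lemma pv_pyGetD_norm {α : Type} (t : List α) (x : Int) (d : α)
    (h1 : 1 - (t.length : Int) ≤ x) (h2 : x ≤ t.length) :
    PySem.List.pyGetD t (x - 1) d = PySem.List.pyGetD t ((pvNorm t.length x : Nat) : Int) d := by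
  unfold PySem.List.pyGetD PySem.List.pyGet?
  rw [pv_pyIdx_norm t.length x h1 h2, pv_pyIdx_natCast t.length _ (pv_norm_lt t.length x h1 h2)]

-- the increment loop, one coordinate at a time
lemma pv_length_foldA (l : List Int) (t : List Int) :
    (l.foldl (fun t x => PySem.List.pySetD t (x - 1) (PySem.List.pyGetD t (x - 1) 0 + 1)) t).length
      = t.length := by
  induction l generalizing t with
  | nil => rfl
  | cons x l ih => simp [List.foldl_cons, ih, PySem.List.length_pySetD]

lemma pv_foldA_getD (l : List Int) (t : List Int)
    (hl : ∀ x ∈ l, 1 - (t.length : Int) ≤ x ∧ x ≤ t.length)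
    (i : Nat) (hi : i < t.length) :
    PySem.List.pyGetD (l.foldl (fun t x => PySem.List.pySetD t (x - 1) (PySem.List.pyGetD t (x - 1) 0 + 1)) t) (i : Int) 0
      = PySem.List.pyGetD t (i : Int) 0 + pvCnt l t.length (i : Int) := by
  induction l generalizing t with
  | nil => simp [pvCnt]
  | cons x l ih =>
      obtain ⟨hx1, hx2⟩ := hl x (by simp)
      set n : Nat := pvNorm t.length x with hn
      have hnlen : n < t.length := pv_norm_lt t.length x hx1 hx2
      have hstep : PySem.List.pySetD t (x - 1) (PySem.List.pyGetD t (x - 1) 0 + 1)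
          = PySem.List.pySetD t (n : Int) (PySem.List.pyGetD t (n : Int) 0 + 1) := by
        rw [pv_pySetD_norm t x _ hx1 hx2, pv_pyGetD_norm t x _ hx1 hx2]
      rw [List.foldl_cons, hstep, ih]
      · rw [PySem.List.pyGetD_pySetD_natCast _ _ _ _ _ hnlen]
        have hlen' : (PySem.List.pySetD t (n : Int) (PySem.List.pyGetD t (n : Int) 0 + 1)).length
            = t.length := PySem.List.length_pySetD _ _ _
        rw [hlen']
        by_cases h : i = n
        · simp [h, pvCnt, List.countP_cons]
          omega
        · have hxx : ¬ (((pvNorm t.length x : Nat) : Int) == (i : Int)) = true := by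
            simp; omega
          simp [h, pvCnt, List.countP_cons, hxx]
      · intro y hy
        have := hl y (by simp [hy])
        simpa [PySem.List.length_pySetD] using this
      · simpa [PySem.List.length_pySetD] using hi

-- the running-max-with-argmax-set loop of A
lemma pv_maxloop (g : Int → Int) (l : List Int) (hnd : l.Nodup) :
    (l.foldl (fun (s : PySem.Set Int × Int) i =>
        if s.2 == g i then (PySem.Set.add s.1 i, s.2)
        else if s.2 < g i then (PySem.Set.add PySem.Set.empty i, g i)
        else s) (PySem.Set.empty, 0))
      = (l.filter (fun i => g i == l.foldl (fun acc i => max acc (g i)) 0),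
         l.foldl (fun acc i => max acc (g i)) 0) := by
  induction l using List.reverseRecOn with
  | nil => simp [PySem.Set.empty]
  | append_singleton l x ih =>
      have hnd' : l.Nodup := hnd.sublist (List.sublist_append_left _ _)
      have hx : x ∉ l := fun hm =>
        ((by simpa using (List.nodup_append.mp hnd).2.2 : ∀ a ∈ l, ¬ a = x)) x hm rfl
      have hbound := PySem.List.le_foldl_max_int l g 0
      set M := l.foldl (fun acc i => max acc (g i)) 0 with hM
      have hM' : (l ++ [x]).foldl (fun acc i => max acc (g i)) 0 = max M (g x) := by
        rw [List.foldl_append]; rfl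
      rw [List.foldl_append, ih hnd', hM', List.filter_append, List.foldl_cons, List.foldl_nil]
      rcases lt_trichotomy M (g x) with hlt | heq | hgt
      · have hmax : max M (g x) = g x := by omega
        have h1 : ¬ ((M == g x) = true) := by simp; omega
        have hfl : l.filter (fun i => g i == g x) = [] := by
          rw [List.filter_eq_nil_iff]
          intro a ha
          have := hbound.2 a ha
          simp; omega
        rw [if_neg h1, if_pos hlt, hmax, hfl]
        rw [pv_add_notmem _ _ (by simp : x ∉ (PySem.Set.empty : PySem.Set Int))]
        simp [PySem.Set.empty]
      · have hmax : max M (g x) = M := by omega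
        have h1 : (M == g x) = true := by simp [heq]
        have hnotin : x ∉ l.filter (fun i => g i == M) := fun h => hx (List.mem_of_mem_filter h)
        rw [if_pos h1, hmax, pv_add_notmem _ _ hnotin]
        simp [heq]
      · have hmax : max M (g x) = M := by omega
        have h1 : ¬ ((M == g x) = true) := by simp; omega
        have h2 : ¬ (g x == M) = true := by simp; omega
        rw [if_neg h1, if_neg (not_lt.mpr hgt.le), hmax]
        simp [h2]

-- max(…, default=0) over a list of nonnegative values is the running max from 0
lemma pv_maxD_eq_foldl (xs : List Int) (h : ∀ x ∈ xs, 0 ≤ x) :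
    PySem.List.maxD xs (fun x => x) 0 = xs.foldl max 0 := by
  cases xs with
  | nil => rfl
  | cons x t =>
      rw [PySem.List.maxD, PySem.List.max?_id_cons, Option.getD_some, List.foldl_cons,
        max_eq_right (h x (by simp))]

-- the value of a filled count array at an in-range index, for any all-zero initial array
lemma pv_axis_getD (xs : List Int) (H : Int) (hx : ∀ x ∈ xs, 1 - H ≤ x ∧ x ≤ H)
    (t0 : List Int) (hlen : t0.length = H.toNat)
    (h0 : ∀ i : Int, 0 ≤ i → i < H → PySem.List.pyGetD t0 i 0 = 0)
    (i : Int) (hi : i ∈ PySem.List.pyRange 0 H 1) :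
    PySem.List.pyGetD (xs.foldl (fun t x => PySem.List.pySetD t (x - 1) (PySem.List.pyGetD t (x - 1) 0 + 1)) t0) i 0
      = pvCnt xs H.toNat i := by
  have hi' := PySem.List.mem_pyRange_one.mp hi
  have hi2 : i = ((i.toNat : Nat) : Int) := by omega
  have hHn : (H.toNat : Int) = H := by omega
  rw [hi2, pv_foldA_getD]
  · rw [← hi2, h0 i hi'.1 hi'.2, zero_add, hlen]
  · intro y hy
    have := hx y hy
    rw [hlen]; omega
  · rw [hlen]; omega

-- every entry of a filled count array is a count, hence nonnegative
lemma pv_axis_nonneg (xs : List Int) (H : Int) (hx : ∀ x ∈ xs, 1 - H ≤ x ∧ x ≤ H)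
    (t0 : List Int) (hlen : t0.length = H.toNat)
    (h0 : ∀ i : Int, 0 ≤ i → i < H → PySem.List.pyGetD t0 i 0 = 0) :
    ∀ v ∈ xs.foldl (fun t x => PySem.List.pySetD t (x - 1) (PySem.List.pyGetD t (x - 1) 0 + 1)) t0, 0 ≤ v := by
  intro v hv
  set T := xs.foldl (fun t x => PySem.List.pySetD t (x - 1) (PySem.List.pyGetD t (x - 1) 0 + 1)) t0 with hT
  rcases List.mem_iff_getElem.mp hv with ⟨k, hk, hkv⟩
  have hlenT : T.length = t0.length := pv_length_foldA xs t0
  have hkH : (k : Int) < H := by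
    have := hk; rw [hlenT, hlen] at this
    omega
  have hmem : (k : Int) ∈ PySem.List.pyRange 0 H 1 := PySem.List.mem_pyRange_one.mpr ⟨by omega, hkH⟩
  have := pv_axis_getD xs H hx t0 hlen h0 (k : Int) hmem
  rw [← hT] at this
  rw [PySem.List.pyGetD_eq_getElem _ _ (by omega) (by exact_mod_cast hk)] at this
  simp only [Int.toNat_natCast] at this
  rw [hkv] at this
  rw [this]
  exact pv_cnt_nonneg _ _ _

-- set(map f) for injective f is the mapped set
lemma pv_ofList_map_inj {α β : Type} [BEq α] [LawfulBEq α] [BEq β] [LawfulBEq β]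
    (f : α → β) (hf : Function.Injective f) (l : List α) :
    PySem.Set.ofList (l.map f) = (PySem.Set.ofList l).map f := by
  induction l using List.reverseRecOn with
  | nil => rfl
  | append_singleton l x ih =>
      rw [List.map_append, List.map_singleton, PySem.Set.ofList_eq_foldl, PySem.Set.ofList_eq_foldl,
        List.foldl_append, List.foldl_append, List.foldl_cons, List.foldl_nil, List.foldl_cons,
        List.foldl_nil, ← PySem.Set.ofList_eq_foldl, ← PySem.Set.ofList_eq_foldl, ih]
      by_cases hx : x ∈ PySem.Set.ofList l
      · have hfx : f x ∈ (PySem.Set.ofList l).map f := List.mem_map_of_mem hx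
        simp [PySem.Set.add, hx, hfx]
      · have hfx : f x ∉ (PySem.Set.ofList l).map f := by
          intro hm
          rcases List.mem_map.mp hm with ⟨a, ha, he⟩
          exact hx (hf he ▸ ha)
        rw [pv_add_notmem _ _ hx, pv_add_notmem _ _ hfx, List.map_append, List.map_singleton]

-- strict cardinality inequality ↔ a free intersection cell exists
lemma pv_card_lt_iff (Bl : List (Int × Int)) (Rl Cl : List Int) (S : List (Int × Int))
    (hR : Rl.Nodup) (hC : Cl.Nodup) (hS : S.Nodup)
    (hmem : ∀ x : Int × Int, x ∈ S ↔ x ∈ Bl ∧ x.1 ∈ Rl ∧ x.2 ∈ Cl) :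
    (S.length < Rl.length * Cl.length) ↔ ∃ r ∈ Rl, ∃ c ∈ Cl, (r, c) ∉ Bl := by
  classical
  have hsub : S.toFinset ⊆ Rl.toFinset ×ˢ Cl.toFinset := by
    intro x hxS
    rcases (hmem x).mp (List.mem_toFinset.mp hxS) with ⟨-, h1, h2⟩
    simpa [Finset.mem_product, List.mem_toFinset] using ⟨h1, h2⟩
  have hcS : S.toFinset.card = S.length := List.toFinset_card_of_nodup hS
  have hcP : (Rl.toFinset ×ˢ Cl.toFinset).card = Rl.length * Cl.length := by
    rw [Finset.card_product, List.toFinset_card_of_nodup hR, List.toFinset_card_of_nodup hC]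
  constructor
  · intro hlt
    have hne : S.toFinset ≠ Rl.toFinset ×ˢ Cl.toFinset := by
      intro he
      rw [← hcS, ← hcP, he] at hlt
      exact lt_irrefl _ hlt
    obtain ⟨x, hxP, hxS⟩ := Finset.exists_of_ssubset (ssubset_of_subset_of_ne hsub hne)
    rcases Finset.mem_product.mp hxP with ⟨hx1, hx2⟩
    refine ⟨x.1, List.mem_toFinset.mp hx1, x.2, List.mem_toFinset.mp hx2, ?_⟩
    intro hB
    exact hxS (List.mem_toFinset.mpr ((hmem (x.1, x.2)).mpr ⟨hB, List.mem_toFinset.mp hx1, List.mem_toFinset.mp hx2⟩))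
  · rintro ⟨r, hr, c, hc, hnB⟩
    have hxS : (r, c) ∉ S.toFinset := by
      intro hmemS
      exact hnB ((hmem (r, c)).mp (List.mem_toFinset.mp hmemS)).1
    have hxP : (r, c) ∈ Rl.toFinset ×ˢ Cl.toFinset := by
      simp [Finset.mem_product, List.mem_toFinset, hr, hc]
    rw [← hcS, ← hcP]
    exact Finset.card_lt_card (Finset.ssubset_iff_of_subset hsub |>.mpr ⟨(r, c), hxP, hxS⟩)

-- a fold over the pairs keyed through a projection is a fold over the projected list
lemma pv_fold_key {σ γ : Type} (B : List (Int × Int)) (f : (Int × Int) → γ) (g : σ → γ → σ) (init : σ) :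
    B.foldl (fun s b => g s (f b)) init = (B.map f).foldl g init := by rw [List.foldl_map]

lemma pv_notcontains {α : Type} [BEq α] [LawfulBEq α] (s : PySem.Set α) (x : α) :
    ((!PySem.Set.contains s x) = true) ↔ x ∉ s := by
  simp

theorem solve_spec : Claim_equal_solve := by
  intro B H W _ hPre
  unfold Spec_solve
  classical
  have hxs : ∀ x ∈ B.map Prod.fst, 1 - H ≤ x ∧ x ≤ H := by
    intro x hx; rcases List.mem_map.mp hx with ⟨b, hb, rfl⟩
    exact ⟨(hPre b hb).1, (hPre b hb).2.1⟩
  have hys : ∀ y ∈ B.map Prod.snd, 1 - W ≤ y ∧ y ≤ W := by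
    intro y hy; rcases List.mem_map.mp hy with ⟨b, hb, rfl⟩
    exact ⟨(hPre b hb).2.2.1, (hPre b hb).2.2.2⟩
  simp only [solve, solve_alt]
  -- split the multi-accumulator folds into independent folds
  have hsplitA := PySem.List.foldl_prod_mk
    (f := fun (t : List Int) (b : Int × Int) => PySem.List.pySetD t (b.1 - 1) (PySem.List.pyGetD t (b.1 - 1) 0 + 1))
    (g := fun (t : List Int) (b : Int × Int) => PySem.List.pySetD t (b.2 - 1) (PySem.List.pyGetD t (b.2 - 1) 0 + 1))
    B ((PySem.List.pyRange 0 H 1).map (fun _ => (0 : Int))) ((PySem.List.pyRange 0 W 1).map (fun _ => (0 : Int)))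
  have hsplitB1 := PySem.List.foldl_prod_mk
    (f := fun (t : List Int) (b : Int × Int) => PySem.List.pySetD t (b.1 - 1) (PySem.List.pyGetD t (b.1 - 1) 0 + 1))
    (g := fun (s : List Int × PySem.Set (Int × Int)) (b : Int × Int) =>
      (PySem.List.pySetD s.1 (b.2 - 1) (PySem.List.pyGetD s.1 (b.2 - 1) 0 + 1),
       PySem.Set.add s.2 (b.1 - 1, b.2 - 1)))
    B (PySem.List.pyRepeat [(0 : Int)] H) (PySem.List.pyRepeat [(0 : Int)] W, PySem.Set.empty)
  have hsplitB2 := PySem.List.foldl_prod_mk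
    (f := fun (t : List Int) (b : Int × Int) => PySem.List.pySetD t (b.2 - 1) (PySem.List.pyGetD t (b.2 - 1) 0 + 1))
    (g := fun (s : PySem.Set (Int × Int)) (b : Int × Int) => PySem.Set.add s (b.1 - 1, b.2 - 1))
    B (PySem.List.pyRepeat [(0 : Int)] W) PySem.Set.empty
  simp only [hsplitA, hsplitB1, hsplitB2]
  -- coordinate folds become folds over the key lists
  have hkey1 := pv_fold_key B Prod.fst
    (fun t x => PySem.List.pySetD t (x - 1) (PySem.List.pyGetD t (x - 1) 0 + 1))
    ((PySem.List.pyRange 0 H 1).map (fun _ => (0 : Int)))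
  have hkey1' := pv_fold_key B Prod.snd
    (fun t x => PySem.List.pySetD t (x - 1) (PySem.List.pyGetD t (x - 1) 0 + 1))
    ((PySem.List.pyRange 0 W 1).map (fun _ => (0 : Int)))
  have hkey2 := pv_fold_key B Prod.fst
    (fun t x => PySem.List.pySetD t (x - 1) (PySem.List.pyGetD t (x - 1) 0 + 1))
    (PySem.List.pyRepeat [(0 : Int)] H)
  have hkey2' := pv_fold_key B Prod.snd
    (fun t x => PySem.List.pySetD t (x - 1) (PySem.List.pyGetD t (x - 1) 0 + 1))
    (PySem.List.pyRepeat [(0 : Int)] W)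
  have hocc : B.foldl (fun (s : PySem.Set (Int × Int)) b => PySem.Set.add s (b.1 - 1, b.2 - 1)) PySem.Set.empty
      = PySem.Set.ofList (B.map (fun b => (b.1 - 1, b.2 - 1))) := by
    rw [pv_fold_key B (fun b => (b.1 - 1, b.2 - 1)) PySem.Set.add PySem.Set.empty,
      PySem.Set.ofList_eq_foldl]
    rfl
  simp only [hkey1, hkey1', hkey2, hkey2', hocc]
  -- the two zero-filled initial arrays
  have hlenA : ((PySem.List.pyRange 0 H 1).map (fun _ => (0 : Int))).length = H.toNat := by
    simp [PySem.List.length_pyRange_one]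
  have hlenA' : ((PySem.List.pyRange 0 W 1).map (fun _ => (0 : Int))).length = W.toNat := by
    simp [PySem.List.length_pyRange_one]
  have h0A : ∀ i : Int, 0 ≤ i → i < H →
      PySem.List.pyGetD ((PySem.List.pyRange 0 H 1).map (fun _ => (0 : Int))) i 0 = 0 :=
    fun i h1 h2 => PySem.List.pyGetD_map_pyRange_of_nonneg (fun _ => 0) H i 0 h1 h2
  have h0A' : ∀ j : Int, 0 ≤ j → j < W →
      PySem.List.pyGetD ((PySem.List.pyRange 0 W 1).map (fun _ => (0 : Int))) j 0 = 0 :=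
    fun j h1 h2 => PySem.List.pyGetD_map_pyRange_of_nonneg (fun _ => 0) W j 0 h1 h2
  have hlenB : (PySem.List.pyRepeat [(0 : Int)] H).length = H.toNat := by
    rw [PySem.List.pyRepeat_singleton]; simp
  have hlenB' : (PySem.List.pyRepeat [(0 : Int)] W).length = W.toNat := by
    rw [PySem.List.pyRepeat_singleton]; simp
  have h0B : ∀ i : Int, 0 ≤ i → i < H →
      PySem.List.pyGetD (PySem.List.pyRepeat [(0 : Int)] H) i 0 = 0 := by
    intro i h1 h2
    rw [PySem.List.pyRepeat_singleton,
      PySem.List.pyGetD_eq_getElem _ _ h1 (by simp; omega)]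
    simp
  have h0B' : ∀ j : Int, 0 ≤ j → j < W →
      PySem.List.pyGetD (PySem.List.pyRepeat [(0 : Int)] W) j 0 = 0 := by
    intro j h1 h2
    rw [PySem.List.pyRepeat_singleton,
      PySem.List.pyGetD_eq_getElem _ _ h1 (by simp; omega)]
    simp
  -- A's running-max loops
  have hml1 := pv_maxloop (fun i => PySem.List.pyGetD
      ((B.map Prod.fst).foldl (fun t x => PySem.List.pySetD t (x - 1) (PySem.List.pyGetD t (x - 1) 0 + 1))
        ((PySem.List.pyRange 0 H 1).map (fun _ => (0 : Int)))) i 0)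
    (PySem.List.pyRange 0 H 1) (PySem.List.nodup_pyRange_one 0 H)
  have hml2 := pv_maxloop (fun j => PySem.List.pyGetD
      ((B.map Prod.snd).foldl (fun t x => PySem.List.pySetD t (x - 1) (PySem.List.pyGetD t (x - 1) 0 + 1))
        ((PySem.List.pyRange 0 W 1).map (fun _ => (0 : Int)))) j 0)
    (PySem.List.pyRange 0 W 1) (PySem.List.nodup_pyRange_one 0 W)
  simp only [hml1, hml2]
  -- all four filled arrays read back as pvCnt on the range
  have hgTA := pv_axis_getD (B.map Prod.fst) H hxs _ hlenA h0A
  have hgCA := pv_axis_getD (B.map Prod.snd) W hys _ hlenA' h0A'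
  have hgTB := pv_axis_getD (B.map Prod.fst) H hxs _ hlenB h0B
  have hgCB := pv_axis_getD (B.map Prod.snd) W hys _ hlenB' h0B'
  -- A's maxima and candidate lists are pvM/pvK
  have hMT : (PySem.List.pyRange 0 H 1).foldl (fun acc i => max acc (PySem.List.pyGetD
      ((B.map Prod.fst).foldl (fun t x => PySem.List.pySetD t (x - 1) (PySem.List.pyGetD t (x - 1) 0 + 1))
        ((PySem.List.pyRange 0 H 1).map (fun _ => (0 : Int)))) i 0)) 0 = pvM (B.map Prod.fst) H := by
    unfold pvM
    apply PySem.List.foldl_congr_mem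
    intro acc i hi
    rw [hgTA i hi]
  have hMC : (PySem.List.pyRange 0 W 1).foldl (fun acc j => max acc (PySem.List.pyGetD
      ((B.map Prod.snd).foldl (fun t x => PySem.List.pySetD t (x - 1) (PySem.List.pyGetD t (x - 1) 0 + 1))
        ((PySem.List.pyRange 0 W 1).map (fun _ => (0 : Int)))) j 0)) 0 = pvM (B.map Prod.snd) W := by
    unfold pvM
    apply PySem.List.foldl_congr_mem
    intro acc j hj
    rw [hgCA j hj]
  simp only [hMT, hMC]
  have hKT : (PySem.List.pyRange 0 H 1).filter (fun i => PySem.List.pyGetD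
      ((B.map Prod.fst).foldl (fun t x => PySem.List.pySetD t (x - 1) (PySem.List.pyGetD t (x - 1) 0 + 1))
        ((PySem.List.pyRange 0 H 1).map (fun _ => (0 : Int)))) i 0 == pvM (B.map Prod.fst) H)
      = pvK (B.map Prod.fst) H := by
    unfold pvK
    apply List.filter_congr
    intro i hi
    rw [hgTA i hi]
  have hKC : (PySem.List.pyRange 0 W 1).filter (fun j => PySem.List.pyGetD
      ((B.map Prod.snd).foldl (fun t x => PySem.List.pySetD t (x - 1) (PySem.List.pyGetD t (x - 1) 0 + 1))
        ((PySem.List.pyRange 0 W 1).map (fun _ => (0 : Int)))) j 0 == pvM (B.map Prod.snd) W)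
      = pvK (B.map Prod.snd) W := by
    unfold pvK
    apply List.filter_congr
    intro j hj
    rw [hgCA j hj]
  simp only [hKT, hKC]
  -- A's candidate-occupied set is a filtered ofList
  have hCf : B.foldl (fun (c : PySem.Set (Int × Int)) b =>
      if PySem.Set.contains (pvK (B.map Prod.fst) H) (b.1 - 1)
          && PySem.Set.contains (pvK (B.map Prod.snd) W) (b.2 - 1)
      then PySem.Set.add c b else c) PySem.Set.empty
      = PySem.Set.ofList (B.filter (fun b =>
          PySem.Set.contains (pvK (B.map Prod.fst) H) (b.1 - 1)
            && PySem.Set.contains (pvK (B.map Prod.snd) W) (b.2 - 1))) := by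
    rw [PySem.List.foldl_if_eq_foldl_filter, PySem.Set.ofList_eq_foldl]
    rfl
  simp only [hCf]
  -- B's maxima are pvM, B's candidate lists are pvK
  have hTB : ∀ v ∈ (B.map Prod.fst).foldl (fun t x => PySem.List.pySetD t (x - 1) (PySem.List.pyGetD t (x - 1) 0 + 1))
      (PySem.List.pyRepeat [(0 : Int)] H), 0 ≤ v := pv_axis_nonneg _ H hxs _ hlenB h0B
  have hTB' : ∀ v ∈ (B.map Prod.snd).foldl (fun t x => PySem.List.pySetD t (x - 1) (PySem.List.pyGetD t (x - 1) 0 + 1))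
      (PySem.List.pyRepeat [(0 : Int)] W), 0 ≤ v := pv_axis_nonneg _ W hys _ hlenB' h0B'
  have hrangeH : PySem.List.pyRange 0 (((B.map Prod.fst).foldl (fun t x => PySem.List.pySetD t (x - 1) (PySem.List.pyGetD t (x - 1) 0 + 1))
      (PySem.List.pyRepeat [(0 : Int)] H)).length : Int) 1 = PySem.List.pyRange 0 H 1 := by
    rw [pv_length_foldA, hlenB]
    rcases le_or_gt 0 H with h | h
    · rw [show ((H.toNat : Nat) : Int) = H by omega]
    · rw [PySem.List.pyRange_one_eq_nil (by omega : H ≤ 0),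
        PySem.List.pyRange_one_eq_nil (by omega : ((H.toNat : Nat) : Int) ≤ 0)]
  have hrangeW : PySem.List.pyRange 0 (((B.map Prod.snd).foldl (fun t x => PySem.List.pySetD t (x - 1) (PySem.List.pyGetD t (x - 1) 0 + 1))
      (PySem.List.pyRepeat [(0 : Int)] W)).length : Int) 1 = PySem.List.pyRange 0 W 1 := by
    rw [pv_length_foldA, hlenB']
    rcases le_or_gt 0 W with h | h
    · rw [show ((W.toNat : Nat) : Int) = W by omega]
    · rw [PySem.List.pyRange_one_eq_nil (by omega : W ≤ 0),
        PySem.List.pyRange_one_eq_nil (by omega : ((W.toNat : Nat) : Int) ≤ 0)]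
  have hBmax : PySem.List.maxD ((B.map Prod.fst).foldl (fun t x => PySem.List.pySetD t (x - 1) (PySem.List.pyGetD t (x - 1) 0 + 1))
      (PySem.List.pyRepeat [(0 : Int)] H)) (fun x => x) 0 = pvM (B.map Prod.fst) H := by
    rw [pv_maxD_eq_foldl _ hTB,
      ← PySem.List.foldl_pyRange_zero_pyGetD' _ (0 : Int) max 0, hrangeH]
    unfold pvM
    apply PySem.List.foldl_congr_mem
    intro acc i hi
    rw [hgTB i hi]
  have hBmax' : PySem.List.maxD ((B.map Prod.snd).foldl (fun t x => PySem.List.pySetD t (x - 1) (PySem.List.pyGetD t (x - 1) 0 + 1))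
      (PySem.List.pyRepeat [(0 : Int)] W)) (fun x => x) 0 = pvM (B.map Prod.snd) W := by
    rw [pv_maxD_eq_foldl _ hTB',
      ← PySem.List.foldl_pyRange_zero_pyGetD' _ (0 : Int) max 0, hrangeW]
    unfold pvM
    apply PySem.List.foldl_congr_mem
    intro acc j hj
    rw [hgCB j hj]
  simp only [hBmax, hBmax']
  have hKB : (PySem.List.pyRange 0 H 1).filter (fun i => PySem.List.pyGetD
      ((B.map Prod.fst).foldl (fun t x => PySem.List.pySetD t (x - 1) (PySem.List.pyGetD t (x - 1) 0 + 1))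
        (PySem.List.pyRepeat [(0 : Int)] H)) i 0 == pvM (B.map Prod.fst) H)
      = pvK (B.map Prod.fst) H := by
    unfold pvK
    apply List.filter_congr
    intro i hi
    rw [hgTB i hi]
  have hKB' : (PySem.List.pyRange 0 W 1).filter (fun j => PySem.List.pyGetD
      ((B.map Prod.snd).foldl (fun t x => PySem.List.pySetD t (x - 1) (PySem.List.pyGetD t (x - 1) 0 + 1))
        (PySem.List.pyRepeat [(0 : Int)] W)) j 0 == pvM (B.map Prod.snd) W)
      = pvK (B.map Prod.snd) W := by
    unfold pvK
    apply List.filter_congr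
    intro j hj
    rw [hgCB j hj]
  simp only [hKB, hKB']
  -- compare the two branch conditions
  have hshift_inj : Function.Injective (fun b : Int × Int => (b.1 - 1, b.2 - 1)) := by
    intro a b h
    simp only [Prod.mk.injEq] at h
    exact Prod.ext (by omega) (by omega)
  have hSlen : (PySem.Set.ofList (B.filter (fun b =>
        PySem.Set.contains (pvK (B.map Prod.fst) H) (b.1 - 1)
          && PySem.Set.contains (pvK (B.map Prod.snd) W) (b.2 - 1)))).length
      = (PySem.Set.ofList ((B.map (fun b : Int × Int => (b.1 - 1, b.2 - 1))).filter (fun q =>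
          PySem.Set.contains (pvK (B.map Prod.fst) H) q.1
            && PySem.Set.contains (pvK (B.map Prod.snd) W) q.2))).length := by
    rw [List.filter_map, pv_ofList_map_inj _ hshift_inj, List.length_map]
    rfl
  have hndK : (pvK (B.map Prod.fst) H).Nodup := (PySem.List.nodup_pyRange_one 0 H).filter _
  have hndK' : (pvK (B.map Prod.snd) W).Nodup := (PySem.List.nodup_pyRange_one 0 W).filter _
  have hiff1 := pv_card_lt_iff (B.map (fun b : Int × Int => (b.1 - 1, b.2 - 1)))
    (pvK (B.map Prod.fst) H) (pvK (B.map Prod.snd) W)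
    (PySem.Set.ofList ((B.map (fun b : Int × Int => (b.1 - 1, b.2 - 1))).filter (fun q =>
        PySem.Set.contains (pvK (B.map Prod.fst) H) q.1
          && PySem.Set.contains (pvK (B.map Prod.snd) W) q.2)))
    hndK hndK' (PySem.Set.nodup_ofList _)
    (by
      intro x
      simp only [PySem.Set.mem_ofList, List.mem_filter, Bool.and_eq_true,
        PySem.Set.contains_iff])
  have hiff : ((pvK (B.map Prod.fst) H).length * (pvK (B.map Prod.snd) W).length
        > (PySem.Set.ofList (B.filter (fun b =>
            PySem.Set.contains (pvK (B.map Prod.fst) H) (b.1 - 1)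
              && PySem.Set.contains (pvK (B.map Prod.snd) W) (b.2 - 1)))).length)
      ↔ ((pvK (B.map Prod.fst) H).any (fun i =>
          (pvK (B.map Prod.snd) W).any (fun j =>
            !(PySem.Set.contains (PySem.Set.ofList (B.map (fun b : Int × Int => (b.1 - 1, b.2 - 1)))) (i, j)))) = true) := by
    rw [gt_iff_lt, hSlen, hiff1]
    simp only [List.any_eq_true, pv_notcontains, PySem.Set.mem_ofList]
  exact if_congr hiff rfl rfl
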